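-- pv_equiv track=rewrite | github.com/Pg1910/healwise | backend/safety/early_warning.py | get_warning_resources
-- ===== SOURCE A (Python) =====
-- from typing import List, Dict, Any
--
-- def get_warning_resources(warnings: List[str]) -> List[str]:
--     """
--     Get specific resources based on warning types
--
--     Args:
--         warnings (List[str]): Generated warnings
--
--     Returns:
--         List[str]: Relevant resource texts from kb/ or external sources
--     """
--     resources = []
--
--     for warning in warnings:
--         if "crisis" in warning.lower() or "emergency" in warning.lower():
--             resources.append("National Suicide Prevention Lifeline: 988")
--             resources.append("Crisis Text Line: Text HOME to 741741")
--
--         elif "anxiety" in warning.lower():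
--             resources.append("Anxiety grounding technique: 5-4-3-2-1 sensory method")
--             resources.append("Deep breathing: 4-7-8 technique (inhale 4, hold 7, exhale 8)")
--
--         elif "isolation" in warning.lower():
--             resources.append("Social connection ideas: reach out to one trusted person today")
--             resources.append("Support groups: NAMI.org for local mental health communities")
--
--         elif "self-care" in warning.lower():
--             resources.append("Sleep hygiene: consistent sleep schedule and relaxing bedtime routine")
--             resources.append("Nutrition support: small, regular meals even when appetite is low")
--
--     # Remove duplicates
--     return list(dict.fromkeys(resources))
-- ===== SOURCE B (Python) =====
-- _KEYWORDS = [
--     ["crisis", "emergency"],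
--     ["anxiety"],
--     ["isolation"],
--     ["self-care"],
-- ]
--
-- _RESOURCES = [
--     ["National Suicide Prevention Lifeline: 988",
--      "Crisis Text Line: Text HOME to 741741"],
--     ["Anxiety grounding technique: 5-4-3-2-1 sensory method",
--      "Deep breathing: 4-7-8 technique (inhale 4, hold 7, exhale 8)"],
--     ["Social connection ideas: reach out to one trusted person today",
--      "Support groups: NAMI.org for local mental health communities"],
--     ["Sleep hygiene: consistent sleep schedule and relaxing bedtime routine",
--      "Nutrition support: small, regular meals even when appetite is low"],
-- ]
--
--
-- def _category(warning):
--     """Index of the first keyword group hit by the warning, or None."""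
--     w = warning.lower()
--     for i, kws in enumerate(_KEYWORDS):
--         if any(k in w for k in kws):
--             return i
--     return None
--
--
-- def get_warning_resources(warnings):
--     # Stage 1: dedup at the CATEGORY level (ordered set of category indices).
--     order = []
--     for warning in warnings:
--         c = _category(warning)
--         if c is not None and c not in order:
--             order.append(c)
--     # Stage 2: expand each distinct category into its resource block.
--     return [r for c in order for r in _RESOURCES[c]]
-- ===== Notes on version B (the rewrite author's own statement) =====
-- stated objective: alternative
-- what changed: Instead of accumulating resource strings per warning and deduplicating the string list at the end, B classifies each warning into a category index, keeps an ordered set of the distinct categories hit, and only at the end expands the distinct categories into their resource blocks; correct because the four resource blocks are internally duplicate-free and pairwise disjoint.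
import Mathlib
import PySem

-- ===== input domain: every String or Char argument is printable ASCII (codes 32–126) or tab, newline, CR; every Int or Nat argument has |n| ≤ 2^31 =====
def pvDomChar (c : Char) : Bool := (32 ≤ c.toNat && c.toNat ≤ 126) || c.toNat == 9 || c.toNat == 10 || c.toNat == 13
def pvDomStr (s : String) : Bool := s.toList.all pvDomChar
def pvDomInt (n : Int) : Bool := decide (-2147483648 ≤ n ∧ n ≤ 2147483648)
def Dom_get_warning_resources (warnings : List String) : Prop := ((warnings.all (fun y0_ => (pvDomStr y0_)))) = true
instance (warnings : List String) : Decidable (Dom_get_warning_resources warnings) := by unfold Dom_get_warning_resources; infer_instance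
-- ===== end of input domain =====

-- B classifies each warning into a category index, keeps an ordered set of distinct categories, and expands
-- them into resource blocks only at the end — instead of A's append-resources-per-warning then dedup-strings.

-- ===== PORT A =====
def get_warning_resources (warnings : List String) : List String :=
  PySem.List.dedup (warnings.foldl (fun resources warning =>
    if PySem.Str.isIn "crisis" (PySem.Str.lower warning) || PySem.Str.isIn "emergency" (PySem.Str.lower warning) then
      resources ++ ["National Suicide Prevention Lifeline: 988",
                    "Crisis Text Line: Text HOME to 741741"]
    else if PySem.Str.isIn "anxiety" (PySem.Str.lower warning) then
      resources ++ ["Anxiety grounding technique: 5-4-3-2-1 sensory method",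
                    "Deep breathing: 4-7-8 technique (inhale 4, hold 7, exhale 8)"]
    else if PySem.Str.isIn "isolation" (PySem.Str.lower warning) then
      resources ++ ["Social connection ideas: reach out to one trusted person today",
                    "Support groups: NAMI.org for local mental health communities"]
    else if PySem.Str.isIn "self-care" (PySem.Str.lower warning) then
      resources ++ ["Sleep hygiene: consistent sleep schedule and relaxing bedtime routine",
                    "Nutrition support: small, regular meals even when appetite is low"]
    else resources) [])

-- ===== PORT B =====
def pvKeywords : List (List String) :=
  [["crisis", "emergency"], ["anxiety"], ["isolation"], ["self-care"]]

def pvResources : List (List String) :=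
  [ ["National Suicide Prevention Lifeline: 988",
     "Crisis Text Line: Text HOME to 741741"],
    ["Anxiety grounding technique: 5-4-3-2-1 sensory method",
     "Deep breathing: 4-7-8 technique (inhale 4, hold 7, exhale 8)"],
    ["Social connection ideas: reach out to one trusted person today",
     "Support groups: NAMI.org for local mental health communities"],
    ["Sleep hygiene: consistent sleep schedule and relaxing bedtime routine",
     "Nutrition support: small, regular meals even when appetite is low"] ]

-- Source B's _category: index of the first keyword group hit, or None (the enumerate/return loop IS findIdx?)
def pvCategory (warning : String) : Option Nat :=
  pvKeywords.findIdx? (fun kws => kws.any (fun k => PySem.Str.isIn k (PySem.Str.lower warning)))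

def get_warning_resources_alt (warnings : List String) : List String :=
  -- stage 1: ordered set of distinct category indices (Source B's `c not in order` append = PySem.Set.add)
  (warnings.foldl (fun order warning =>
      match pvCategory warning with
      | some c => PySem.Set.add order c
      | none => order) []).flatMap
    -- stage 2: expand each distinct category into its resource block (_RESOURCES[c])
    (fun c => pvResources.getD c [])

-- ===== PRECONDITION & SPEC =====
def Spec_get_warning_resources (warnings : List String) (out : List String) : Prop := out = get_warning_resources_alt warnings
instance (warnings : List String) (out : List String) : Decidable (Spec_get_warning_resources warnings out) := by unfold Spec_get_warning_resources; infer_instance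

-- ===== CLAIM (what is proved, stated in full; the proofs are below) =====
def Claim_equal_get_warning_resources : Prop := ∀ (warnings : List String), Dom_get_warning_resources warnings → Spec_get_warning_resources warnings (get_warning_resources warnings)

-- ===== LEMMAS AND PROOFS =====

-- the resource block of category c
def pvRES (c : Nat) : List String := pvResources.getD c []

-- categories ≥ 4 have no block
theorem pvRES_ge4 (c : Nat) : pvRES (c + 4) = [] := by
  simp [pvRES, pvResources, List.getD]

-- each block is duplicate-free
theorem pv_nodup (c : Nat) : (pvRES c).Nodup := by
  rcases c with _ | _ | _ | _ | c
  · decide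
  · decide
  · decide
  · decide
  · rw [pvRES_ge4]; exact List.nodup_nil

-- a resource string determines its category
theorem pv_mem_RES (x : String) (c : Nat) (h : x ∈ pvRES c) : c < 4 := by
  by_contra hc
  rw [show c = (c - 4) + 4 by omega, pvRES_ge4] at h
  exact absurd h (List.not_mem_nil)

-- blocks are pairwise disjoint
theorem pv_disj (x : String) (c c' : Nat) (h : x ∈ pvRES c) (h' : x ∈ pvRES c') : c = c' := by
  have h4 := pv_mem_RES x c h
  have h4' := pv_mem_RES x c' h'
  interval_cases c <;> interval_cases c' <;>
    first
      | rfl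
      | (exfalso
         simp [pvRES, pvResources] at h h'
         rcases h with rfl | rfl <;> rcases h' with h' | h' <;> simp_all)

-- folding Set.add over elements already present does nothing
theorem pv_foldl_add_subset {α : Type} [BEq α] [LawfulBEq α] (ys : List α) (s : List α)
    (h : ∀ x ∈ ys, x ∈ s) : List.foldl PySem.Set.add s ys = s := by
  induction ys generalizing s with
  | nil => rfl
  | cons y ys ih =>
      have hy : y ∈ s := h y (by simp)
      simp only [List.foldl_cons, PySem.Set.add, PySem.Set.contains]
      rw [if_pos (by simpa using hy)]
      exact ih s (fun x hx => h x (by simp [hx]))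

-- folding Set.add over fresh, duplicate-free elements appends them
theorem pv_foldl_add_fresh {α : Type} [BEq α] [LawfulBEq α] (ys : List α) (s : List α)
    (hnd : ys.Nodup) (h : ∀ x ∈ ys, x ∉ s) : List.foldl PySem.Set.add s ys = s ++ ys := by
  induction ys generalizing s with
  | nil => simp
  | cons y ys ih =>
      have hy : y ∉ s := h y (by simp)
      simp only [List.foldl_cons, PySem.Set.add, PySem.Set.contains]
      rw [if_neg (by simpa using hy)]
      rw [ih (s ++ [y]) hnd.of_cons]
      · simp
      · intro x hx
        simp only [List.mem_append, List.mem_singleton]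
        rintro (hxs | rfl)
        · exact h x (by simp [hx]) hxs
        · exact (List.nodup_cons.mp hnd).1 hx

-- one category step commutes with block expansion
theorem pv_add_flat (seen : List Nat) (c : Nat) :
    List.foldl PySem.Set.add (seen.flatMap pvRES) (pvRES c)
      = (PySem.Set.add seen c).flatMap pvRES := by
  by_cases hc : c ∈ seen
  · rw [show PySem.Set.add seen c = seen by simp [PySem.Set.add, PySem.Set.contains, hc]]
    exact pv_foldl_add_subset _ _ (fun x hx => List.mem_flatMap.mpr ⟨c, hc, hx⟩)
  · rw [show PySem.Set.add seen c = seen ++ [c] by simp [PySem.Set.add, PySem.Set.contains, hc]]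
    rw [pv_foldl_add_fresh _ _ (pv_nodup c)]
    · simp [List.flatMap_append]
    · intro x hx hmem
      obtain ⟨c', hc', hx'⟩ := List.mem_flatMap.mp hmem
      exact hc ((pv_disj x c c' hx hx') ▸ hc')

-- block-wise: dedup of a concatenation of blocks = concatenation over the deduped categories
theorem pv_ofList_flat (cs seen : List Nat) :
    List.foldl PySem.Set.add (seen.flatMap pvRES) (cs.flatMap pvRES)
      = (List.foldl PySem.Set.add seen cs).flatMap pvRES := by
  induction cs generalizing seen with
  | nil => rfl
  | cons c cs ih =>
      simp only [List.flatMap_cons, List.foldl_append, List.foldl_cons]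
      rw [pv_add_flat seen c]
      exact ih (PySem.Set.add seen c)

-- A's elif chain on one warning = the block of that warning's category
theorem pv_stepA (resources : List String) (warning : String) :
    (if PySem.Str.isIn "crisis" (PySem.Str.lower warning) || PySem.Str.isIn "emergency" (PySem.Str.lower warning) then
      resources ++ ["National Suicide Prevention Lifeline: 988",
                    "Crisis Text Line: Text HOME to 741741"]
    else if PySem.Str.isIn "anxiety" (PySem.Str.lower warning) then
      resources ++ ["Anxiety grounding technique: 5-4-3-2-1 sensory method",
                    "Deep breathing: 4-7-8 technique (inhale 4, hold 7, exhale 8)"]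
    else if PySem.Str.isIn "isolation" (PySem.Str.lower warning) then
      resources ++ ["Social connection ideas: reach out to one trusted person today",
                    "Support groups: NAMI.org for local mental health communities"]
    else if PySem.Str.isIn "self-care" (PySem.Str.lower warning) then
      resources ++ ["Sleep hygiene: consistent sleep schedule and relaxing bedtime routine",
                    "Nutrition support: small, regular meals even when appetite is low"]
    else resources)
    = resources ++ ((pvCategory warning).elim [] pvRES) := by
  cases h1 : PySem.Chars.isIn ['c', 'r', 'i', 's', 'i', 's'] (PySem.Chars.lower warning.toList) <;>
    cases h2 : PySem.Chars.isIn ['e', 'm', 'e', 'r', 'g', 'e', 'n', 'c', 'y'] (PySem.Chars.lower warning.toList) <;>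
    cases h3 : PySem.Chars.isIn ['a', 'n', 'x', 'i', 'e', 't', 'y'] (PySem.Chars.lower warning.toList) <;>
    cases h4 : PySem.Chars.isIn ['i', 's', 'o', 'l', 'a', 't', 'i', 'o', 'n'] (PySem.Chars.lower warning.toList) <;>
    cases h5 : PySem.Chars.isIn ['s', 'e', 'l', 'f', '-', 'c', 'a', 'r', 'e'] (PySem.Chars.lower warning.toList) <;>
    simp [pvCategory, pvKeywords, List.findIdx?, List.findIdx?.go, pvRES, pvResources,
          h1, h2, h3, h4, h5]

-- A's accumulation = concatenation of the blocks of the classified warnings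
theorem pv_A_flat (warnings : List String) (acc : List String) :
    warnings.foldl (fun resources warning =>
      if PySem.Str.isIn "crisis" (PySem.Str.lower warning) || PySem.Str.isIn "emergency" (PySem.Str.lower warning) then
        resources ++ ["National Suicide Prevention Lifeline: 988",
                      "Crisis Text Line: Text HOME to 741741"]
      else if PySem.Str.isIn "anxiety" (PySem.Str.lower warning) then
        resources ++ ["Anxiety grounding technique: 5-4-3-2-1 sensory method",
                      "Deep breathing: 4-7-8 technique (inhale 4, hold 7, exhale 8)"]
      else if PySem.Str.isIn "isolation" (PySem.Str.lower warning) then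
        resources ++ ["Social connection ideas: reach out to one trusted person today",
                      "Support groups: NAMI.org for local mental health communities"]
      else if PySem.Str.isIn "self-care" (PySem.Str.lower warning) then
        resources ++ ["Sleep hygiene: consistent sleep schedule and relaxing bedtime routine",
                      "Nutrition support: small, regular meals even when appetite is low"]
      else resources) acc
    = acc ++ (warnings.filterMap pvCategory).flatMap pvRES := by
  induction warnings generalizing acc with
  | nil => simp
  | cons w ws ih =>
      rw [List.foldl_cons, pv_stepA, ih, List.filterMap_cons]
      cases h : pvCategory w <;> simp

-- B's stage-1 fold = ordered-set fold over the classified warnings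
theorem pv_B_order (warnings : List String) (order : List Nat) :
    warnings.foldl (fun order warning =>
      match pvCategory warning with
      | some c => PySem.Set.add order c
      | none => order) order
    = List.foldl PySem.Set.add order (warnings.filterMap pvCategory) := by
  induction warnings generalizing order with
  | nil => rfl
  | cons w ws ih =>
      rw [List.foldl_cons, List.filterMap_cons]
      cases h : pvCategory w <;> simp [ih]

-- ===== VERDICT (by name: the statement is the Claim_ definition above) =====
theorem get_warning_resources_spec : Claim_equal_get_warning_resources := by
  intro warnings _
  unfold Spec_get_warning_resources get_warning_resources get_warning_resources_alt
  rw [pv_A_flat, pv_B_order]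
  show PySem.List.dedup _ = _
  rw [PySem.List.dedup, PySem.Set.ofList]
  simpa using pv_ofList_flat (warnings.filterMap pvCategory) []
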